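-- pv_equiv track=rewrite | github.com/osint-automated/OSINT-Python-Scripts | telegram_scrape_and_processing.py | merge_and_dedupe_rows
-- ===== SOURCE A (Python) =====
-- def merge_and_dedupe_rows(
--     existing: list[tuple[int, dict]],
--     fresh: list[tuple[int, dict]],
-- ) -> list[dict]:
--     """Sort newest first, and keep only first occurrence of each URL."""
--     combined = existing + fresh
--     combined.sort(key=lambda item: item[0], reverse=True)
--
--     seen: set[str] = set()
--     result: list[dict] = []
--     for _, row in combined:
--         url = (row.get("url") or "").strip()
--         if not url or url in seen:
--             continue
--         seen.add(url)
--         result.append(row)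
--     return result
-- ===== SOURCE B (Python) =====
-- def merge_and_dedupe_rows(
--     existing: list[tuple[int, dict]],
--     fresh: list[tuple[int, dict]],
-- ) -> list[dict]:
--     """Dedupe first via a URL-keyed dict (keep newest, earliest on ties), then sort the survivors."""
--     best: dict[str, tuple[int, int, dict]] = {}
--     idx = 0
--     for ts, row in existing + fresh:
--         url = (row.get("url") or "").strip()
--         if url:
--             cur = best.get(url)
--             if cur is None or ts > cur[0]:
--                 best[url] = (ts, idx, row)
--         idx += 1
--     winners = sorted(best.values(), key=lambda t: (-t[0], t[1]))
--     return [row for _, _, row in winners]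
-- ===== Notes on version B (the rewrite author's own statement) =====
-- stated objective: alternative
-- what changed: Replaces sort-all-then-scan-for-first-URL-occurrence with a single hash-map pass keeping the best (newest, earliest-on-tie) row per URL, followed by a sort of only the distinct survivors by (-timestamp, original index).
import Mathlib
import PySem

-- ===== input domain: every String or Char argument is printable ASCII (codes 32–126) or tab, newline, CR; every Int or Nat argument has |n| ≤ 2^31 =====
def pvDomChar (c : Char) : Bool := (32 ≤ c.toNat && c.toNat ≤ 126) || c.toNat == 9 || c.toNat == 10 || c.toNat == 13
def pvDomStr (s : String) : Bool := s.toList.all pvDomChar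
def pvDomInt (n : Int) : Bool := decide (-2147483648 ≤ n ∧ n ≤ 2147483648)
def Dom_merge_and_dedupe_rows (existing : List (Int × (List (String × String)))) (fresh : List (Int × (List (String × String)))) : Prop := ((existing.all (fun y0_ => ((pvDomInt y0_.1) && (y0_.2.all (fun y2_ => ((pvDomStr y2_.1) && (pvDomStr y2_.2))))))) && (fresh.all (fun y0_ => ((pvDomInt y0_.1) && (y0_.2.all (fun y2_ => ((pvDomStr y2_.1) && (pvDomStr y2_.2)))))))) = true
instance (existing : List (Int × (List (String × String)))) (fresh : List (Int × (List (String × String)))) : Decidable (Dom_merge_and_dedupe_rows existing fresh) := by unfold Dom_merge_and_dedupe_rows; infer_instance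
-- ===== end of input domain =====

-- B dedupes in one dict pass (newest timestamp per URL, earliest on ties) and sorts only the
-- distinct survivors by (-timestamp, original index), instead of A's sort-everything-then-scan;
-- same return value, no argument is mutated by either version.

-- ===== PORT A =====
def merge_and_dedupe_rows (existing : List (Int × (List (String × String)))) (fresh : List (Int × (List (String × String)))) : List (List (String × String)) :=
  let combined := existing ++ fresh
  let sortedC := PySem.List.sorted combined (fun item => item.1) true
  (sortedC.foldl
    (fun (acc : PySem.Set String × List (List (String × String))) pr =>
      let url := PySem.Str.strip (((PySem.Dict.mk pr.2).get? "url").getD "")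
      if url = "" ∨ url ∈ acc.1 then acc
      else (acc.1.add url, acc.2 ++ [pr.2]))
    (PySem.Set.ofList [], [])).2

-- ===== PORT B =====
def merge_and_dedupe_rows_alt (existing : List (Int × (List (String × String)))) (fresh : List (Int × (List (String × String)))) : List (List (String × String)) :=
  let best := ((existing ++ fresh).foldl
    (fun (acc : PySem.Dict String (Int × Int × List (String × String)) × Int) pr =>
      let url := PySem.Str.strip (((PySem.Dict.mk pr.2).get? "url").getD "")
      let d :=
        if url = "" then acc.1
        else
          match acc.1.get? url with
          | none => acc.1.insert url (pr.1, acc.2, pr.2)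
          | some cur => if cur.1 < pr.1 then acc.1.insert url (pr.1, acc.2, pr.2) else acc.1
      (d, acc.2 + 1))
    (PySem.Dict.empty, 0)).1
  (PySem.List.sorted2 best.values (fun t => -t.1) (fun t => t.2.1)).map (fun t => t.2.2)

-- ===== PRECONDITION & SPEC =====
def Spec_merge_and_dedupe_rows (existing : List (Int × (List (String × String)))) (fresh : List (Int × (List (String × String)))) (out : List (List (String × String))) : Prop := out = merge_and_dedupe_rows_alt existing fresh
instance (existing : List (Int × (List (String × String)))) (fresh : List (Int × (List (String × String)))) (out : List (List (String × String))) : Decidable (Spec_merge_and_dedupe_rows existing fresh out) := by unfold Spec_merge_and_dedupe_rows; infer_instance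

-- ===== CLAIM (what is proved, stated in full; the proofs are below) =====
def Claim_equal_merge_and_dedupe_rows : Prop := ∀ (existing : List (Int × (List (String × String)))) (fresh : List (Int × (List (String × String)))), Dom_merge_and_dedupe_rows existing fresh → Spec_merge_and_dedupe_rows existing fresh (merge_and_dedupe_rows existing fresh)

-- ===== LEMMAS AND PROOFS =====

-- Shorthands and proof-side definitions
abbrev PvRow := List (String × String)
abbrev PvEntry := (Int × PvRow) × Nat

-- the stripped url of a row, as both ports compute it
def pvUrl (r : PvRow) : String := PySem.Str.strip (((PySem.Dict.mk r).get? "url").getD "")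

-- lexicographic sort key (-timestamp, original index) of an index-tagged row
def pvKey (e : PvEntry) : Lex (Int × Int) := toLex (-(e.1.1), (e.2 : Int))

-- reshaping an index-tagged row into the tuple B's dict stores
def pvShape (e : PvEntry) : Int × Int × PvRow := (e.1.1, (e.2 : Int), e.1.2)

-- A's first-occurrence-per-url filter, on index-tagged rows
def pvSel : List PvEntry → List String → List PvEntry
  | [], _ => []
  | e :: t, seen =>
      if pvUrl e.1.2 = "" ∨ pvUrl e.1.2 ∈ seen then pvSel t seen
      else e :: pvSel t (seen ++ [pvUrl e.1.2])

-- the value B's dict holds for url u after scanning C: the newest (earliest-on-tie) row with that url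
def pvBest (C : List (Int × PvRow)) (u : String) (v : Int × Int × PvRow) : Prop :=
  ∃ (k : Nat) (hk : k < C.length),
    u = pvUrl (C[k].2) ∧ u ≠ "" ∧ v = (C[k].1, (k : Int), C[k].2) ∧
    ∀ (j : Nat) (hj : j < C.length), pvUrl (C[j].2) = u →
      (C[j].1 < C[k].1 ∨ (C[j].1 = C[k].1 ∧ k ≤ j))

-- A's fold step / B's fold step, named for the proofs (identical to the lambdas in the ports)
def pvStepA (acc : PySem.Set String × List PvRow) (pr : Int × PvRow) : PySem.Set String × List PvRow :=
  let url := PySem.Str.strip (((PySem.Dict.mk pr.2).get? "url").getD "")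
  if url = "" ∨ url ∈ acc.1 then acc
  else (acc.1.add url, acc.2 ++ [pr.2])

def pvStepB (acc : PySem.Dict String (Int × Int × PvRow) × Int) (pr : Int × PvRow) :
    PySem.Dict String (Int × Int × PvRow) × Int :=
  let url := PySem.Str.strip (((PySem.Dict.mk pr.2).get? "url").getD "")
  let d :=
    if url = "" then acc.1
    else
      match acc.1.get? url with
      | none => acc.1.insert url (pr.1, acc.2, pr.2)
      | some cur => if cur.1 < pr.1 then acc.1.insert url (pr.1, acc.2, pr.2) else acc.1
  (d, acc.2 + 1)

theorem portA_eq (existing fresh : List (Int × PvRow)) :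
    merge_and_dedupe_rows existing fresh =
      ((PySem.List.sorted (existing ++ fresh) (fun item => item.1) true).foldl pvStepA
        (PySem.Set.ofList [], [])).2 := rfl

theorem portB_eq (existing fresh : List (Int × PvRow)) :
    merge_and_dedupe_rows_alt existing fresh =
      (PySem.List.sorted2 (((existing ++ fresh).foldl pvStepB (PySem.Dict.empty, 0)).1).values
        (fun t => -t.1) (fun t => t.2.1)).map (fun t => t.2.2) := rfl

theorem pvUrl_eq (r : PvRow) : PySem.Str.strip (((PySem.Dict.mk r).get? "url").getD "") = pvUrl r := rfl

theorem pvInsertBy_map {α β : Type} (f : β → α) (p : α → α → Bool) (q : β → β → Bool)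
    (x : α) (x' : β) (hx : f x' = x) :
    ∀ (M : List β), (∀ m ∈ M, p x (f m) = q x' m) →
      PySem.List.insertBy p x (M.map f) = (PySem.List.insertBy q x' M).map f := by
  intro M
  induction M with
  | nil => intro _; simp [PySem.List.insertBy, hx]
  | cons m t ih =>
      intro h
      simp only [List.map_cons, PySem.List.insertBy]
      rw [h m (by simp)]
      by_cases hq : q x' m = true
      · simp [hq, hx]
      · simp only [Bool.not_eq_true] at hq
        simp [hq, ih (fun b hb => h b (by simp [hb]))]

theorem pvSorted2_eq {α : Type} (xs : List α) (k1 k2 : α → Int) :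
    PySem.List.sorted2 xs k1 k2 = PySem.List.sorted xs (fun x => toLex (k1 x, k2 x)) := by
  have h : (fun a b => decide (k1 a < k1 b) || (!decide (k1 b < k1 a) && decide (k2 a < k2 b)))
         = (fun a b => decide (toLex (k1 a, k2 a) < toLex (k1 b, k2 b))) := by
    funext a b
    rcases lt_trichotomy (k1 a) (k1 b) with h | h | h
    · simp [Prod.Lex.lt_iff, h, not_lt.mpr h.le]
    · simp [Prod.Lex.lt_iff, h]
    · simp [Prod.Lex.lt_iff, not_lt.mpr h.le, h.ne', h]
  simp only [PySem.List.sorted2, PySem.List.sorted]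
  rw [h]
  simp

theorem pvZipIdx_snd_lt {α : Type} (xs : List α) (n : Nat) :
    (xs.zipIdx n).Pairwise (fun a b => a.2 < b.2) := by
  rw [List.pairwise_iff_getElem]
  intro i j hi hj hij
  simp only [List.getElem_zipIdx]
  omega

theorem pvStable_sort (xs : List (Int × PvRow)) :
    PySem.List.sorted xs (fun p => p.1) true =
      (PySem.List.sorted xs.zipIdx pvKey false).map (fun e => e.1) := by
  induction xs using List.reverseRecOn with
  | nil => simp [PySem.List.sorted]
  | append_singleton xs x ih =>
      have hz : (xs ++ [x]).zipIdx = xs.zipIdx ++ [(x, xs.length)] := by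
        simp [List.zipIdx_append]
      simp only [PySem.List.sorted, if_true] at ih ⊢
      rw [hz, List.foldl_append, List.foldl_append]
      simp only [List.foldl_cons, List.foldl_nil]
      rw [ih]
      refine (pvInsertBy_map (fun e => e.1) _ _ x (x, xs.length) rfl _ ?_)
      intro m hm
      have hmem : m ∈ xs.zipIdx := by
        have := (PySem.List.mem_sorted xs.zipIdx pvKey false m).mp hm
        exact this
      have hlt : m.2 < xs.length := ((List.mem_zipIdx' (x := m.1) (i := m.2) (by simpa using hmem))).1
      simp only [Bool.false_eq_true, if_false, pvKey, decide_eq_decide, Prod.Lex.lt_iff, ofLex_toLex]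
      omega

theorem pvFoldA (M : List PvEntry) :
    ∀ (seen : PySem.Set String) (res : List PvRow),
      ((M.map (fun e => e.1)).foldl pvStepA (seen, res)).2 =
        res ++ (pvSel M seen).map (fun e => e.1.2) := by
  induction M with
  | nil => intro seen res; simp [pvSel]
  | cons e t ih =>
      intro seen res
      simp only [List.map_cons, List.foldl_cons, pvSel]
      by_cases h : pvUrl e.1.2 = "" ∨ pvUrl e.1.2 ∈ seen
      · have hstep : pvStepA (seen, res) e.1 = (seen, res) := by
          simp only [pvStepA]
          rw [if_pos]
          exact h
        rw [hstep, if_pos h, ih]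
      · push_neg at h
        have hstep : pvStepA (seen, res) e.1 = (seen ++ [pvUrl e.1.2], res ++ [e.1.2]) := by
          simp only [pvStepA]
          rw [if_neg (by rw [not_or]; exact ⟨h.1, h.2⟩)]
          rw [pvUrl_eq, PySem.Set.add_of_not_mem h.2]
        rw [hstep, if_neg (by rw [not_or]; exact ⟨h.1, h.2⟩), ih]
        simp

theorem pvSel_sublist (L : List PvEntry) : ∀ (seen : List String), (pvSel L seen).Sublist L := by
  induction L with
  | nil => intro seen; simp [pvSel]
  | cons e t ih =>
      intro seen
      simp only [pvSel]
      split_ifs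
      · exact (ih seen).cons e
      · exact (ih _).cons₂ e

theorem pvSel_mem_split (a : PvEntry) :
    ∀ (L : List PvEntry) (seen : List String),
      a ∈ pvSel L seen ↔
        ∃ L₁ L₂, L = L₁ ++ a :: L₂ ∧ pvUrl a.1.2 ≠ "" ∧ pvUrl a.1.2 ∉ seen ∧
          ∀ b ∈ L₁, pvUrl b.1.2 ≠ pvUrl a.1.2 := by
  intro L
  induction L with
  | nil =>
      intro seen
      simp [pvSel]
  | cons e t ih =>
      intro seen
      simp only [pvSel]
      by_cases hc : pvUrl e.1.2 = "" ∨ pvUrl e.1.2 ∈ seen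
      · rw [if_pos hc, ih seen]
        constructor
        · rintro ⟨L₁, L₂, hsplit, h1, h2, h3⟩
          refine ⟨e :: L₁, L₂, by simp [hsplit], h1, h2, ?_⟩
          intro b hb
          rcases List.mem_cons.mp hb with hb | hb
          · subst hb
            rcases hc with hc | hc
            · rw [hc]; exact fun h => h1 h.symm
            · intro h; exact h2 (h ▸ hc)
          · exact h3 b hb
        · rintro ⟨L₁, L₂, hsplit, h1, h2, h3⟩
          cases L₁ with
          | nil =>
              simp only [List.nil_append, List.cons.injEq] at hsplit
              exfalso
              rcases hc with hc | hc
              · exact h1 (hsplit.1 ▸ hc)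
              · exact h2 (hsplit.1 ▸ hc)
          | cons c T₁ =>
              simp only [List.cons_append, List.cons.injEq] at hsplit
              exact ⟨T₁, L₂, hsplit.2, h1, h2, fun b hb => h3 b (by simp [hb])⟩
      · rw [if_neg hc, List.mem_cons, ih (seen ++ [pvUrl e.1.2])]
        push_neg at hc
        constructor
        · rintro (h | ⟨L₁, L₂, hsplit, h1, h2, h3⟩)
          · subst h
            exact ⟨[], t, rfl, hc.1, hc.2, by simp⟩
          · rw [List.mem_append] at h2
            push_neg at h2
            refine ⟨e :: L₁, L₂, by simp [hsplit], h1, h2.1, ?_⟩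
            intro b hb
            rcases List.mem_cons.mp hb with hb | hb
            · subst hb
              intro h
              exact h2.2 (by simp [h])
            · exact h3 b hb
        · rintro ⟨L₁, L₂, hsplit, h1, h2, h3⟩
          cases L₁ with
          | nil =>
              simp only [List.nil_append, List.cons.injEq] at hsplit
              exact Or.inl hsplit.1.symm
          | cons c T₁ =>
              simp only [List.cons_append, List.cons.injEq] at hsplit
              right
              refine ⟨T₁, L₂, hsplit.2, h1, ?_, fun b hb => h3 b (by simp [hb])⟩
              rw [List.mem_append]
              push_neg
              refine ⟨h2, ?_⟩
              have := h3 c (by simp)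
              rw [← hsplit.1] at this
              simp [Ne.symm this]

theorem pvSel_mem (S : List PvEntry) (hpw : S.Pairwise (fun a b => pvKey a < pvKey b)) (a : PvEntry) :
    a ∈ pvSel S [] ↔
      a ∈ S ∧ pvUrl a.1.2 ≠ "" ∧
        ∀ b ∈ S, pvUrl b.1.2 = pvUrl a.1.2 → b = a ∨ pvKey a < pvKey b := by
  rw [pvSel_mem_split]
  constructor
  · rintro ⟨L₁, L₂, hsplit, h1, _, h3⟩
    subst hsplit
    refine ⟨by simp, h1, ?_⟩
    intro b hb hub
    rcases List.mem_append.mp hb with hb | hb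
    · exact absurd hub (h3 b hb)
    · rcases List.mem_cons.mp hb with hb | hb
      · exact Or.inl hb
      · right
        have := List.pairwise_append.mp hpw
        exact (List.pairwise_cons.mp this.2.1).1 b hb
  · rintro ⟨hmem, h1, hmin⟩
    obtain ⟨L₁, L₂, hsplit⟩ := List.append_of_mem hmem
    refine ⟨L₁, L₂, hsplit, h1, by simp, ?_⟩
    intro b hb
    subst hsplit
    have hba : pvKey b < pvKey a := by
      have := List.pairwise_append.mp hpw
      exact this.2.2 b hb a (by simp)
    intro hub
    rcases hmin b (by simp [hb]) hub with h | h
    · subst h; exact absurd hba (lt_irrefl _)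
    · exact absurd (hba.trans h) (lt_irrefl _)

theorem pvGetElem_append_last (C : List (Int × PvRow)) (p : Int × PvRow) :
    (C ++ [p])[C.length]'(by simp) = p := List.getElem_concat_length rfl _

theorem pvBest_append_of_ne (C : List (Int × PvRow)) (p : Int × PvRow) (u : String)
    (v : Int × Int × PvRow) (hne : pvUrl p.2 ≠ u) : pvBest (C ++ [p]) u v ↔ pvBest C u v := by
  constructor
  · rintro ⟨k, hk, hu, hu0, hv, hmin⟩
    have hkN : k < C.length := by
      by_contra hge
      have hkeq : k = C.length := by simp at hk; omega
      subst hkeq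
      rw [pvGetElem_append_last] at hu
      exact hne hu.symm
    have hCk : (C ++ [p])[k]'hk = C[k] := List.getElem_append_left hkN
    rw [hCk] at hu hv
    refine ⟨k, hkN, hu, hu0, hv, ?_⟩
    intro j hj huj
    have hj' : j < (C ++ [p]).length := by simp; omega
    have := hmin j hj' (by rw [List.getElem_append_left hj]; exact huj)
    rwa [hCk, List.getElem_append_left hj] at this
  · rintro ⟨k, hk, hu, hu0, hv, hmin⟩
    have hk' : k < (C ++ [p]).length := by simp; omega
    have hCk : (C ++ [p])[k]'hk' = C[k] := List.getElem_append_left hk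
    refine ⟨k, hk', by rw [hCk]; exact hu, hu0, by rw [hCk]; exact hv, ?_⟩
    intro j hj huj
    rcases Nat.lt_succ_iff_lt_or_eq.mp (by simpa using hj) with hjN | hjN
    · have := hmin j hjN (by rwa [List.getElem_append_left hjN] at huj)
      rwa [hCk, List.getElem_append_left hjN]
    · exfalso
      subst hjN
      rw [pvGetElem_append_last] at huj
      exact hne huj

theorem pvBest_append_fresh (C : List (Int × PvRow)) (p : Int × PvRow)
    (hu0 : pvUrl p.2 ≠ "") (hnew : ∀ (j : Nat) (hj : j < C.length), pvUrl (C[j].2) ≠ pvUrl p.2)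
    (v : Int × Int × PvRow) :
    pvBest (C ++ [p]) (pvUrl p.2) v ↔ v = (p.1, (C.length : Int), p.2) := by
  constructor
  · rintro ⟨k, hk, hu, _, hv, hmin⟩
    have hkN : k = C.length := by
      by_contra hne
      have hkN : k < C.length := by simp at hk; omega
      exact hnew k hkN (by rw [← List.getElem_append_left (bs := [p]) hkN]; exact hu.symm)
    subst hkN
    rw [pvGetElem_append_last] at hv
    exact hv
  · intro hv
    refine ⟨C.length, by simp, by rw [pvGetElem_append_last], hu0,
      by rw [pvGetElem_append_last]; exact hv, ?_⟩
    intro j hj huj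
    rcases Nat.lt_succ_iff_lt_or_eq.mp (by simpa using hj) with hjN | hjN
    · exact absurd (by rwa [List.getElem_append_left hjN] at huj) (hnew j hjN)
    · subst hjN
      rw [pvGetElem_append_last]
      exact Or.inr ⟨rfl, le_refl _⟩

theorem pvBest_append_newer (C : List (Int × PvRow)) (p : Int × PvRow) (cur : Int × Int × PvRow)
    (hcur : pvBest C (pvUrl p.2) cur) (hlt : cur.1 < p.1) (v : Int × Int × PvRow) :
    pvBest (C ++ [p]) (pvUrl p.2) v ↔ v = (p.1, (C.length : Int), p.2) := by
  obtain ⟨k0, hk0, hu0, hne0, hv0, hmin0⟩ := hcur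
  have hcur1 : cur.1 = C[k0].1 := by rw [hv0]
  constructor
  · rintro ⟨k, hk, hu, _, hv, hmin⟩
    have hkN : k = C.length := by
      by_contra hne
      have hkN : k < C.length := by simp at hk; omega
      have hle : C[k].1 ≤ C[k0].1 := by
        rcases hmin0 k hkN (by rw [← List.getElem_append_left (bs := [p]) hkN]; exact hu.symm) with h | h
        · exact h.le
        · exact h.1.le
      have := hmin C.length (by simp) (by rw [pvGetElem_append_last])
      rw [pvGetElem_append_last, List.getElem_append_left hkN] at this
      omega
    subst hkN
    rw [pvGetElem_append_last] at hv
    exact hv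
  · intro hv
    refine ⟨C.length, by simp, by rw [pvGetElem_append_last], hne0,
      by rw [pvGetElem_append_last]; exact hv, ?_⟩
    intro j hj huj
    rw [pvGetElem_append_last]
    rcases Nat.lt_succ_iff_lt_or_eq.mp (by simpa using hj) with hjN | hjN
    · rw [List.getElem_append_left hjN] at huj ⊢
      have h1 := hmin0 j hjN huj
      omega
    · subst hjN
      rw [pvGetElem_append_last]
      exact Or.inr ⟨rfl, le_refl _⟩

theorem pvBest_append_keep (C : List (Int × PvRow)) (p : Int × PvRow) (cur : Int × Int × PvRow)
    (hcur : pvBest C (pvUrl p.2) cur) (hge : ¬ cur.1 < p.1) (v : Int × Int × PvRow) :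
    pvBest (C ++ [p]) (pvUrl p.2) v ↔ pvBest C (pvUrl p.2) v := by
  obtain ⟨k0, hk0, hu0, hne0, hv0, hmin0⟩ := hcur
  have hcur1 : cur.1 = C[k0].1 := by rw [hv0]
  constructor
  · rintro ⟨k, hk, hu, hb0, hv, hmin⟩
    have hkN : k < C.length := by
      by_contra hne
      have hkN : k = C.length := by simp at hk; omega
      subst hkN
      rcases hmin k0 (by simp; omega) (by rw [List.getElem_append_left hk0]; exact hu0.symm)
        with h | h
      · rw [pvGetElem_append_last, List.getElem_append_left hk0] at h; omega
      · rw [pvGetElem_append_last, List.getElem_append_left hk0] at h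
        omega
    have hCk : (C ++ [p])[k]'hk = C[k] := List.getElem_append_left hkN
    rw [hCk] at hu hv
    refine ⟨k, hkN, hu, hb0, hv, ?_⟩
    intro j hj huj
    have := hmin j (by simp; omega) (by rw [List.getElem_append_left hj]; exact huj)
    rwa [hCk, List.getElem_append_left hj] at this
  · rintro ⟨k, hkN, hu, hb0, hv, hmin⟩
    have hk' : k < (C ++ [p]).length := by simp; omega
    have hCk : (C ++ [p])[k]'hk' = C[k] := List.getElem_append_left hkN
    refine ⟨k, hk', by rw [hCk]; exact hu, hb0, by rw [hCk]; exact hv, ?_⟩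
    intro j hj huj
    rw [hCk]
    rcases Nat.lt_succ_iff_lt_or_eq.mp (by simpa using hj) with hjN | hjN
    · rw [List.getElem_append_left hjN] at huj ⊢
      exact hmin j hjN huj
    · subst hjN
      rw [pvGetElem_append_last] at huj ⊢
      -- p has url u'; v must dominate p: p.1 ≤ cur.1 and cur ≤ v? need: C[k].1 vs p.1
      -- v is the best of C for u', so C[k0].1 ≤ C[k].1 ∨ ..; both are best: actually
      -- from hmin0 at k and hmin at k0 we get C[k].1 = C[k0].1 (both maximal); then p.1 ≤ cur.1 = C[k0].1
      have h1 := hmin0 k hkN hu.symm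
      have h2 := hmin k0 hk0 hu0.symm
      omega

theorem pvNoIdx_append_of_ne (C : List (Int × PvRow)) (p : Int × PvRow) (u : String)
    (hne : pvUrl p.2 ≠ u) :
    (∀ (j : Nat) (hj : j < (C ++ [p]).length), pvUrl ((C ++ [p])[j].2) ≠ u) ↔
      (∀ (j : Nat) (hj : j < C.length), pvUrl (C[j].2) ≠ u) := by
  constructor
  · intro h j hj
    have := h j (by simp; omega)
    rwa [List.getElem_append_left hj] at this
  · intro h j hj
    rcases Nat.lt_succ_iff_lt_or_eq.mp (by simpa using hj) with hjN | hjN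
    · rw [List.getElem_append_left hjN]; exact h j hjN
    · subst hjN; rw [pvGetElem_append_last]; exact hne

theorem pvStepB_fst (acc : PySem.Dict String (Int × Int × PvRow) × Int) (pr : Int × PvRow) :
    (pvStepB acc pr).1 =
      if pvUrl pr.2 = "" then acc.1
      else
        match acc.1.get? (pvUrl pr.2) with
        | none => acc.1.insert (pvUrl pr.2) (pr.1, acc.2, pr.2)
        | some cur => if cur.1 < pr.1 then acc.1.insert (pvUrl pr.2) (pr.1, acc.2, pr.2) else acc.1 := rfl

theorem pvFoldB_snd (xs : List (Int × PvRow)) :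
    ∀ (d : PySem.Dict String (Int × Int × PvRow)) (i : Int),
    (xs.foldl pvStepB (d, i)).2 = i + xs.length := by
  induction xs with
  | nil => intro d i; simp
  | cons p t ih =>
      intro d i
      simp only [List.foldl_cons]
      have : (pvStepB (d, i) p) = ((pvStepB (d, i) p).1, i + 1) := by
        simp [pvStepB]
      rw [this, ih]
      simp; omega

theorem pvGetB (C : List (Int × PvRow)) :
    (∀ u v, ((C.foldl pvStepB (PySem.Dict.empty, 0)).1).get? u = some v ↔ pvBest C u v) ∧
    (∀ u, ((C.foldl pvStepB (PySem.Dict.empty, 0)).1).get? u = none ↔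
      (u = "" ∨ ∀ (j : Nat) (hj : j < C.length), pvUrl (C[j].2) ≠ u)) := by
  induction C using List.reverseRecOn with
  | nil =>
      refine ⟨fun u v => ?_, fun u => ?_⟩
      · simp [PySem.Dict.get?_empty, pvBest]
      · simp [PySem.Dict.get?_empty]
  | append_singleton C p ih =>
      obtain ⟨ihs, ihn⟩ := ih
      rw [List.foldl_append]
      have hsnd : (C.foldl pvStepB (PySem.Dict.empty, 0)).2 = (C.length : Int) := by
        rw [pvFoldB_snd]; simp
      set st := C.foldl pvStepB (PySem.Dict.empty, 0) with hst
      simp only [List.foldl_cons, List.foldl_nil, pvStepB_fst]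
      by_cases hu' : pvUrl p.2 = ""
      · rw [if_pos hu']
        refine ⟨fun u v => ?_, fun u => ?_⟩
        · by_cases huu : u = ""
          · subst huu
            have hnone := (ihn "").mpr (Or.inl rfl)
            rw [hnone]
            constructor
            · intro h; cases h
            · rintro ⟨k, hk, _, hne, _⟩; exact absurd rfl hne
          · rw [pvBest_append_of_ne C p u v (hu' ▸ (Ne.symm huu) : pvUrl p.2 ≠ u)]
            exact ihs u v
        · rw [ihn u]
          by_cases huu : u = ""
          · simp [huu]
          · rw [pvNoIdx_append_of_ne C p u (hu' ▸ (Ne.symm huu))]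
      · rw [if_neg hu']
        cases hg : st.1.get? (pvUrl p.2) with
        | none =>
            dsimp only
            have hnew : ∀ (j : Nat) (hj : j < C.length), pvUrl (C[j].2) ≠ pvUrl p.2 := by
              rcases (ihn (pvUrl p.2)).mp hg with h | h
              · exact absurd h hu'
              · exact h
            refine ⟨fun u v => ?_, fun u => ?_⟩
            · by_cases huu : u = pvUrl p.2
              · subst huu
                rw [PySem.Dict.get?_insert_self, hsnd, pvBest_append_fresh C p hu' hnew v]
                constructor
                · intro h; cases h; rfl
                · intro h; rw [h]
              · rw [PySem.Dict.get?_insert_of_ne _ _ huu,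
                    pvBest_append_of_ne C p u v (Ne.symm huu)]
                exact ihs u v
            · by_cases huu : u = pvUrl p.2
              · subst huu
                rw [PySem.Dict.get?_insert_self]
                constructor
                · intro h; cases h
                · rintro (h | h)
                  · exact absurd h hu'
                  · exact absurd (by rw [pvGetElem_append_last]) (h C.length (by simp))
              · rw [PySem.Dict.get?_insert_of_ne _ _ huu, ihn u]
                by_cases hu0 : u = ""
                · simp [hu0]
                · rw [pvNoIdx_append_of_ne C p u (Ne.symm huu)]
        | some cur =>
            dsimp only
            have hcur : pvBest C (pvUrl p.2) cur := (ihs (pvUrl p.2) cur).mp hg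
            by_cases hlt : cur.1 < p.1
            · rw [if_pos hlt]
              refine ⟨fun u v => ?_, fun u => ?_⟩
              · by_cases huu : u = pvUrl p.2
                · subst huu
                  rw [PySem.Dict.get?_insert_self, hsnd, pvBest_append_newer C p cur hcur hlt v]
                  constructor
                  · intro h; cases h; rfl
                  · intro h; rw [h]
                · rw [PySem.Dict.get?_insert_of_ne _ _ huu,
                      pvBest_append_of_ne C p u v (Ne.symm huu)]
                  exact ihs u v
              · by_cases huu : u = pvUrl p.2
                · subst huu
                  rw [PySem.Dict.get?_insert_self]
                  constructor
                  · intro h; cases h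
                  · rintro (h | h)
                    · exact absurd h hu'
                    · exact absurd (by rw [pvGetElem_append_last]) (h C.length (by simp))
                · rw [PySem.Dict.get?_insert_of_ne _ _ huu, ihn u]
                  by_cases hu0 : u = ""
                  · simp [hu0]
                  · rw [pvNoIdx_append_of_ne C p u (Ne.symm huu)]
            · rw [if_neg hlt]
              refine ⟨fun u v => ?_, fun u => ?_⟩
              · by_cases huu : u = pvUrl p.2
                · subst huu
                  rw [pvBest_append_keep C p cur hcur hlt v]
                  exact ihs _ v
                · rw [pvBest_append_of_ne C p u v (Ne.symm huu)]
                  exact ihs u v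
              · by_cases huu : u = pvUrl p.2
                · subst huu
                  rw [hg]
                  constructor
                  · intro h; cases h
                  · rintro (h | h)
                    · exact absurd h hu'
                    · exact absurd (by rw [pvGetElem_append_last]) (h C.length (by simp))
                · rw [ihn u]
                  by_cases hu0 : u = ""
                  · simp [hu0]
                  · rw [pvNoIdx_append_of_ne C p u (Ne.symm huu)]

theorem pvFoldB_nodup (xs : List (Int × PvRow)) :
    ∀ (d : PySem.Dict String (Int × Int × PvRow)) (i : Int), d.keys.Nodup →
    ((xs.foldl pvStepB (d, i)).1).keys.Nodup := by
  induction xs with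
  | nil => intro d i h; simpa using h
  | cons p t ih =>
      intro d i h
      simp only [List.foldl_cons]
      have hp : pvStepB (d, i) p = ((pvStepB (d, i) p).1, i + 1) := by simp [pvStepB]
      rw [hp]
      apply ih
      rw [pvStepB_fst]
      split_ifs with h1
      · exact h
      · cases hg : d.get? (pvUrl p.2) with
        | none => dsimp only; exact PySem.Dict.nodup_keys_insert _ _ _ h
        | some cur =>
            dsimp only
            split_ifs
            · exact PySem.Dict.nodup_keys_insert _ _ _ h
            · exact h

theorem pvBest_url (C : List (Int × PvRow)) (u : String) (v : Int × Int × PvRow)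
    (h : pvBest C u v) : u = pvUrl v.2.2 := by
  obtain ⟨k, hk, hu, _, hv, _⟩ := h
  rw [hv]; exact hu

theorem pvDictB_nodup (C : List (Int × PvRow)) :
    ((C.foldl pvStepB (PySem.Dict.empty, 0)).1).keys.Nodup := by
  apply pvFoldB_nodup
  exact PySem.Dict.nodup_keys_empty

theorem pvValuesB_mem (C : List (Int × PvRow)) (v : Int × Int × PvRow) :
    v ∈ ((C.foldl pvStepB (PySem.Dict.empty, 0)).1).values ↔ ∃ u, pvBest C u v := by
  have hnd := pvDictB_nodup C
  have hvals : ((C.foldl pvStepB (PySem.Dict.empty, 0)).1).values =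
      ((C.foldl pvStepB (PySem.Dict.empty, 0)).1).items.map (fun pr => pr.2) := rfl
  rw [hvals, List.mem_map]
  constructor
  · rintro ⟨pr, hpr, hv⟩
    refine ⟨pr.1, ?_⟩
    have := (PySem.Dict.get?_eq_some_iff_mem_items _ pr.1 pr.2 hnd).mpr (by simpa using hpr)
    rw [hv] at this
    exact ((pvGetB C).1 pr.1 v).mp this
  · rintro ⟨u, hb⟩
    have := ((pvGetB C).1 u v).mpr hb
    exact ⟨(u, v), (PySem.Dict.get?_eq_some_iff_mem_items _ u v hnd).mp this, rfl⟩

theorem pvValuesB_nodup (C : List (Int × PvRow)) :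
    ((C.foldl pvStepB (PySem.Dict.empty, 0)).1).values.Nodup := by
  have hnd := pvDictB_nodup C
  have hitems : ((C.foldl pvStepB (PySem.Dict.empty, 0)).1).items.Nodup := by
    have : ((C.foldl pvStepB (PySem.Dict.empty, 0)).1).keys =
        ((C.foldl pvStepB (PySem.Dict.empty, 0)).1).items.map (fun pr => pr.1) := rfl
    rw [this] at hnd
    exact List.Nodup.of_map _ hnd
  refine List.Nodup.map_on ?_ hitems
  intro x hx y hy hxy
  have hxb := ((pvGetB C).1 x.1 x.2).mp
    ((PySem.Dict.get?_eq_some_iff_mem_items _ x.1 x.2 hnd).mpr (by simpa using hx))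
  have hyb := ((pvGetB C).1 y.1 y.2).mp
    ((PySem.Dict.get?_eq_some_iff_mem_items _ y.1 y.2 hnd).mpr (by simpa using hy))
  have h1 := pvBest_url _ _ _ hxb
  have h2 := pvBest_url _ _ _ hyb
  have : x.1 = y.1 := by rw [h1, h2, hxy]
  exact Prod.ext this hxy

theorem pvS_pairwise (C : List (Int × PvRow)) :
    (PySem.List.sorted C.zipIdx pvKey false).Pairwise (fun a b => pvKey a < pvKey b) := by
  have hle := PySem.List.sorted_pairwise C.zipIdx pvKey
  have hnodup : ((PySem.List.sorted C.zipIdx pvKey false).map pvKey).Nodup := by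
    have hperm : ((PySem.List.sorted C.zipIdx pvKey false).map pvKey).Perm (C.zipIdx.map pvKey) :=
      (PySem.List.sorted_perm C.zipIdx pvKey false).map pvKey
    rw [hperm.nodup_iff]
    rw [List.Nodup, List.pairwise_map]
    refine (pvZipIdx_snd_lt C 0).imp ?_
    intro a b hab heq
    have := congrArg (fun x => (ofLex x).2) heq
    simp only [pvKey, ofLex_toLex] at this
    omega
  have hne : (PySem.List.sorted C.zipIdx pvKey false).Pairwise (fun a b => pvKey a ≠ pvKey b) := by
    rw [List.Nodup, List.pairwise_map] at hnodup
    exact hnodup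
  exact (hle.and hne).imp (fun h => lt_of_le_of_ne h.1 h.2)

-- membership in S's first-occurrence filter, reshaped, is exactly "being a best row of some url"
theorem pvSel_best (C : List (Int × PvRow)) (v : Int × Int × PvRow) :
    v ∈ (pvSel (PySem.List.sorted C.zipIdx pvKey false) []).map pvShape ↔ ∃ u, pvBest C u v := by
  have hpw := pvS_pairwise C
  have hmemS : ∀ b : PvEntry, b ∈ PySem.List.sorted C.zipIdx pvKey false ↔
      ∃ (h : b.2 < C.length), b.1 = C[b.2] := by
    intro b
    rw [PySem.List.mem_sorted]
    constructor
    · intro hb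
      obtain ⟨h1, h2⟩ := List.mem_zipIdx' (x := b.1) (i := b.2) (by simpa using hb)
      exact ⟨h1, h2⟩
    · rintro ⟨h1, h2⟩
      rw [List.mem_iff_getElem]
      refine ⟨b.2, by simpa using h1, ?_⟩
      rw [List.getElem_zipIdx]
      rw [Nat.zero_add]
      exact Prod.ext h2.symm rfl
  rw [List.mem_map]
  constructor
  · rintro ⟨a, ha, rfl⟩
    rw [pvSel_mem _ hpw a] at ha
    obtain ⟨haS, h1, hmin⟩ := ha
    obtain ⟨hk, hak⟩ := (hmemS a).mp haS
    refine ⟨pvUrl a.1.2, a.2, hk, by rw [← hak], h1, by rw [← hak]; rfl, ?_⟩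
    intro j hj huj
    have hbS : ((C[j], j) : PvEntry) ∈ PySem.List.sorted C.zipIdx pvKey false :=
      (hmemS (C[j], j)).mpr ⟨hj, rfl⟩
    rw [← hak]
    rcases hmin (C[j], j) hbS (by simpa using huj) with h | h
    · have hj2 : j = a.2 := congrArg Prod.snd h
      subst hj2
      exact Or.inr ⟨by rw [hak], le_refl _⟩
    · rw [pvKey, pvKey, Prod.Lex.lt_iff] at h
      simp only [ofLex_toLex] at h
      omega
  · rintro ⟨u, k, hk, hu, hne, hv, hmin⟩
    refine ⟨(C[k], k), ?_, by rw [hv]; rfl⟩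
    rw [pvSel_mem _ hpw]
    refine ⟨(hmemS (C[k], k)).mpr ⟨hk, rfl⟩, by rw [← hu] at *; exact hne, ?_⟩
    intro b hbS hub
    obtain ⟨hb2, hb1⟩ := (hmemS b).mp hbS
    have hub' : pvUrl (C[b.2].2) = u := by
      rw [← hb1]
      exact hub.trans hu.symm
    have hm := hmin b.2 hb2 hub'
    by_cases hbk : b.2 = k
    · left
      have h1 : b.1 = C[k] := by
        rw [hb1]
        simp [hbk]
      exact Prod.ext h1 hbk
    · right
      rw [pvKey, pvKey, Prod.Lex.lt_iff]
      simp only [ofLex_toLex]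
      have hb1' : b.1.1 = C[b.2].1 := by rw [hb1]
      omega

-- ===== VERDICT (by name: the statement is the Claim_ definition above) =====
theorem merge_and_dedupe_rows_spec : Claim_equal_merge_and_dedupe_rows := by
  intro existing fresh _hdom
  unfold Spec_merge_and_dedupe_rows
  rw [portA_eq, portB_eq]
  rw [pvStable_sort, pvFoldA]
  rw [pvSorted2_eq]
  have hsel0 : PySem.Set.ofList ([] : List String) = ([] : List String) := rfl
  rw [hsel0]
  have hsorted :
      PySem.List.sorted ((((existing ++ fresh).foldl pvStepB (PySem.Dict.empty, 0)).1).values)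
        (fun t => toLex (-t.1, t.2.1)) =
      (pvSel (PySem.List.sorted (existing ++ fresh).zipIdx pvKey false) []).map pvShape := by
    apply PySem.List.sorted_eq_of_perm_of_pairwise_lt
    · rw [List.perm_ext_iff_of_nodup ?_ (pvValuesB_nodup (existing ++ fresh))]
      · intro v
        rw [pvSel_best, pvValuesB_mem]
      · -- ys nodup
        refine List.Nodup.map ?_ ?_
        · intro x y hxy
          have h1 := congrArg (fun t => t.1) hxy
          have h2 := congrArg (fun t => t.2.1) hxy
          have h3 := congrArg (fun t => t.2.2) hxy
          simp only [pvShape] at h1 h2 h3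
          refine Prod.ext (Prod.ext h1 h3) ?_
          exact_mod_cast h2
        · refine List.Nodup.sublist (pvSel_sublist _ []) ?_
          refine List.Pairwise.imp ?_ (pvS_pairwise (existing ++ fresh))
          exact fun h => ne_of_apply_ne pvKey (ne_of_lt h)
    · rw [List.pairwise_map]
      exact List.Pairwise.sublist (pvSel_sublist _ []) (pvS_pairwise (existing ++ fresh))
  rw [hsorted]
  simp only [List.map_map, List.nil_append]
  rfl
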